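-- pv_equiv track=rewrite | github.com/miliar/Code_Jam_Webscraper | solutions_python/Problem_135/3908.py | checkForMatch
-- ===== SOURCE A (Python) =====
-- def  checkForMatch(row1, row2):
--     matchesFound = 0
--     cardNumber = ''
--
--     for i in range(4):
--         for j in range(4):
--             if(row1[i] == row2[j]):
--                 cardNumber = row1[i]
--                 matchesFound += 1
--
--     if(matchesFound == 0):
--         return 'Volunteer cheated!'
--     elif(matchesFound == 1):
--         return cardNumber
--     elif(matchesFound >= 2):
--         return 'Bad magician!'
-- ===== SOURCE B (Python) =====
-- def checkForMatch(row1, row2):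
--     # Group by card value: distinct shared cards, match count = sum of
--     # count-products over those distinct cards (no index-by-index scan).
--     r1 = [row1[i] for i in range(4)]
--     r2 = [row2[j] for j in range(4)]
--     shared = [x for x in dict.fromkeys(r1) if x in r2]
--     total = sum(r1.count(x) * r2.count(x) for x in shared)
--     if total == 0:
--         return 'Volunteer cheated!'
--     if total >= 2:
--         return 'Bad magician!'
--     return shared[0]
-- ===== Notes on version B (the rewrite author's own statement) =====
-- stated objective: alternative
-- what changed: Replaces A's 4x4 index-by-index double scan with last-match bookkeeping by a value-grouped computation: the ordered set of distinct shared cards plus a sum of count products per distinct card; when the sum is 1 the unique shared card is the head of that set.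
import Mathlib
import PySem

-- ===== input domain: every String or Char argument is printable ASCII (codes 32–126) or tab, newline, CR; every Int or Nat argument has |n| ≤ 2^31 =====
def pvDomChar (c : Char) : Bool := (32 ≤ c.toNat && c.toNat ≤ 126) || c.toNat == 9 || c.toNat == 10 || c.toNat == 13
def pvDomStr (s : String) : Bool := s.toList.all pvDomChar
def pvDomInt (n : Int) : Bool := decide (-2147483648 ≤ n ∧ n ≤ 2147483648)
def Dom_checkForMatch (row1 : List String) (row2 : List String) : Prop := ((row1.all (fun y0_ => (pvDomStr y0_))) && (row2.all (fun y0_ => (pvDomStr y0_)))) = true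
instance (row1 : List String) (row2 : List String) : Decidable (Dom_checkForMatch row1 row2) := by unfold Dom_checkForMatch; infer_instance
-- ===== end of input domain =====

-- B replaces A's 4×4 index-by-index double scan by a value-grouped computation:
-- distinct shared cards (dict.fromkeys order) and a sum of count products per distinct card.

-- ===== PORT A =====
-- Python A: nested for i,j in range(4): compare row1[i] with row2[j], count matches, remember the last matching card.
-- Indexing is guarded by Pre_ (both lengths ≥ 4), so pyGetD's default "" is never reached on admitted inputs.
def checkForMatch (row1 : List String) (row2 : List String) : String :=
  let st := (PySem.List.pyRange 0 4 1).foldl (fun (s : Int × String) i =>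
    (PySem.List.pyRange 0 4 1).foldl (fun (t : Int × String) j =>
      if PySem.List.pyGetD row1 i "" == PySem.List.pyGetD row2 j "" then
        (t.1 + 1, PySem.List.pyGetD row1 i "")
      else t) s) ((0 : Int), "")
  -- matchesFound starts at 0 and only increments, so Python's final 'elif matchesFound >= 2' is the remaining case
  if st.1 == 0 then "Volunteer cheated!"
  else if st.1 == 1 then st.2
  else "Bad magician!"

-- ===== PORT B =====
def checkForMatch_alt (row1 : List String) (row2 : List String) : String :=
  let r1 := (PySem.List.pyRange 0 4 1).map (fun i => PySem.List.pyGetD row1 i "")   -- [row1[i] for i in range(4)]; Pre_ keeps the indices in range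
  let r2 := (PySem.List.pyRange 0 4 1).map (fun j => PySem.List.pyGetD row2 j "")
  let shared := (PySem.List.dedup r1).filter (fun x => r2.contains x)   -- [x for x in dict.fromkeys(r1) if x in r2]
  let total := (shared.map (fun x => (r1.count x : Int) * (r2.count x : Int))).sum
  if total == 0 then "Volunteer cheated!"
  else if 2 ≤ total then "Bad magician!"
  else PySem.List.pyGetD shared 0 ""   -- shared[0]; total = 1 ⇒ shared ≠ [], so Python never raises here

-- ===== PRECONDITION & SPEC =====
-- Python A indexes row1[i], row2[j] for i,j in range(4): on rows shorter than 4 it raises IndexError.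
def Pre_checkForMatch (row1 : List String) (row2 : List String) : Prop :=
  4 ≤ row1.length ∧ 4 ≤ row2.length
instance (row1 : List String) (row2 : List String) : Decidable (Pre_checkForMatch row1 row2) := by unfold Pre_checkForMatch; infer_instance
def pvWitness_checkForMatch : List String × List String := (["1", "2", "3", "4"], ["3", "5", "6", "7"])
def Spec_checkForMatch (row1 : List String) (row2 : List String) (out : String) : Prop := out = checkForMatch_alt row1 row2
instance (row1 : List String) (row2 : List String) (out : String) : Decidable (Spec_checkForMatch row1 row2 out) := by unfold Spec_checkForMatch; infer_instance

-- ===== CLAIM (what is proved, stated in full; the proofs are below) =====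
def Claim_equal_checkForMatch : Prop := ∀ (row1 : List String) (row2 : List String), Dom_checkForMatch row1 row2 → Pre_checkForMatch row1 row2 → Spec_checkForMatch row1 row2 (checkForMatch row1 row2)

-- ===== LEMMAS AND PROOFS =====

-- a list of length ≥ 4 starts with four elements
lemma exists4 {α : Type} (l : List α) (h : 4 ≤ l.length) :
    ∃ a b c d t, l = a :: b :: c :: d :: t := by
  match l with
  | a :: b :: c :: d :: t => exact ⟨a, b, c, d, t, rfl⟩
  | [] | [_] | [_, _] | [_, _, _] => simp at h

-- A's inner loop over a list of cards: adds the number of matches and sets the card iff there was one.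
lemma innerLoop (r2 : List String) (x : String) (s : Int × String) :
    r2.foldl (fun (t : Int × String) y => if x == y then (t.1 + 1, x) else t) s
      = (s.1 + r2.count x, if 0 < r2.count x then x else s.2) := by
  induction r2 generalizing s with
  | nil => simp
  | cons y ys ih =>
    by_cases hxy : x = y
    · subst hxy
      rw [List.foldl_cons, if_pos (by simp), ih, List.count_cons_self]
      simp only [Prod.mk.injEq]
      refine ⟨by push_cast; ring, ?_⟩
      rw [if_pos (Nat.succ_pos _), ite_self]
    · rw [List.foldl_cons, if_neg (by simp [hxy]), ih, List.count_cons_of_ne (Ne.symm hxy)]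

-- A's outer loop, as a pair fold: first component accumulates the counts, second is the last-match fold.
lemma pairFold (l : List String) (g : String → Int) (P : String → Prop) [DecidablePred P]
    (t : Int) (c : String) :
    l.foldl (fun (s : Int × String) x => (s.1 + g x, if P x then x else s.2)) (t, c)
      = (t + (l.map g).sum, l.foldl (fun c x => if P x then x else c) c) := by
  induction l generalizing t c with
  | nil => simp
  | cons y ys ih => simp only [List.foldl_cons, List.map_cons, List.sum_cons, ih]; ring_nf

-- 'keep the last x satisfying P' is the last element of the filtered list.
lemma lastIfFold (l : List String) (P : String → Prop) [DecidablePred P] (c : String) :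
    l.foldl (fun c x => if P x then x else c) c
      = (l.filter (fun x => decide (P x))).getLastD c := by
  induction l generalizing c with
  | nil => rfl
  | cons y ys ih =>
    rw [List.foldl_cons, ih, List.filter_cons]
    by_cases h : P y
    · rw [if_pos h, if_pos (by simp [h]), List.getLastD_cons]
    · rw [if_neg h, if_neg (by simp [h])]

-- grouping: the sum of count-products over the distinct shared values equals the per-occurrence match count.
lemma groupedSum (l1 l2 : List String) :
    (((PySem.List.dedup l1).filter (fun x => l2.contains x)).map
        (fun x => (l1.count x : Int) * (l2.count x : Int))).sum
      = (((l1.map (fun x => l2.count x)).sum : Nat) : Int) := by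
  have hnd : ((PySem.List.dedup l1).filter (fun x => l2.contains x)).Nodup :=
    (PySem.List.nodup_dedup l1).filter _
  rw [← List.sum_toFinset _ hnd, List.toFinset_filter]
  have htf : (PySem.List.dedup l1).toFinset = l1.toFinset := by
    ext x; simp
  rw [htf]
  have hcast : (((l1.map (fun x => l2.count x)).sum : Nat) : Int)
      = (l1.map (fun x => ((l2.count x : Nat) : Int))).sum := by
    rw [Nat.cast_list_sum, List.map_map]; rfl
  rw [hcast, Finset.sum_list_map_count l1 (fun x => ((l2.count x : Nat) : Int)),
    Finset.sum_filter]
  refine Finset.sum_congr rfl (fun x _ => ?_)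
  by_cases hx : x ∈ l2
  · rw [if_pos (by simpa [List.contains_iff_mem] using hx)]
    simp
  · rw [if_neg (by simpa [List.contains_iff_mem] using hx), List.count_eq_zero.mpr hx]
    simp

-- each filtered-in occurrence contributes at least one to the match count
lemma filterLen_le_sum (l1 l2 : List String) :
    (l1.filter (fun x => l2.contains x)).length ≤ (l1.map (fun x => l2.count x)).sum := by
  induction l1 with
  | nil => simp
  | cons y ys ih =>
    rw [List.filter_cons, List.map_cons, List.sum_cons]
    by_cases h : l2.contains y = true
    · rw [if_pos h]
      have : 0 < l2.count y := List.count_pos_iff.mpr (List.contains_iff_mem.mp h)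
      simp only [List.length_cons]
      omega
    · rw [if_neg h]
      exact ih.trans (Nat.le_add_left _ _)

-- if nothing of l1 lies in l2 then the match count is zero
lemma sum_zero_of_filter_nil (l1 l2 : List String)
    (h : l1.filter (fun x => l2.contains x) = []) :
    (l1.map (fun x => l2.count x)).sum = 0 := by
  apply List.sum_eq_zero
  intro n hn
  obtain ⟨x, hx, rfl⟩ := List.mem_map.mp hn
  have hx2 : x ∉ l2 := by
    intro hm
    have : x ∈ l1.filter (fun x => l2.contains x) :=
      List.mem_filter.mpr ⟨hx, by simp [hm]⟩
    rw [h] at this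
    simp at this
  simpa using List.count_eq_zero.mpr hx2

-- a duplicate-free list whose members are exactly x is [x]
lemma nodup_mem_singleton (l : List String) (x : String)
    (hnd : l.Nodup) (hmem : ∀ y, y ∈ l ↔ y = x) : l = [x] := by
  match l, hnd with
  | [], _ => exact absurd ((hmem x).mpr rfl) (by simp)
  | [y], _ => simp [(hmem y).mp (by simp)]
  | y :: z :: t, hnd =>
    have hy : y = x := (hmem y).mp (by simp)
    have hz : z = x := (hmem z).mp (by simp)
    subst hy hz
    simp at hnd

set_option maxHeartbeats 2000000 in
theorem checkForMatch_spec : Claim_equal_checkForMatch := by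
  intro row1 row2 _ hpre
  obtain ⟨h1, h2⟩ := hpre
  obtain ⟨a, b, c, d, t1, rfl⟩ := exists4 row1 h1
  obtain ⟨e, f, g, h, t2, rfl⟩ := exists4 row2 h2
  show checkForMatch _ _ = checkForMatch_alt _ _
  -- the inner loop of A, per outer element
  have hA : ∀ (x : String) (s : Int × String),
      List.foldl (fun (t : Int × String) j =>
        if x == PySem.List.pyGetD (e :: f :: g :: h :: t2) j "" then (t.1 + 1, x) else t)
        s [0, 1, 2, 3]
      = (s.1 + ([e, f, g, h].count x : Int), if 0 < [e, f, g, h].count x then x else s.2) := by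
    intro x s
    have hh := innerLoop [e, f, g, h] x s
    simp only [List.foldl_cons, List.foldl_nil] at hh ⊢
    simpa [pysem] using hh
  unfold checkForMatch checkForMatch_alt
  rw [show PySem.List.pyRange 0 4 1 = [0, 1, 2, 3] from by decide]
  simp only [hA]
  -- A's outer loop is the pair fold over the first four cards of row1
  have houter : List.foldl (fun (s : Int × String) i =>
        (s.1 + ([e, f, g, h].count (PySem.List.pyGetD (a :: b :: c :: d :: t1) i "") : Int),
         if 0 < [e, f, g, h].count (PySem.List.pyGetD (a :: b :: c :: d :: t1) i "")
         then PySem.List.pyGetD (a :: b :: c :: d :: t1) i "" else s.2))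
        ((0 : Int), "") [0, 1, 2, 3]
      = List.foldl (fun (s : Int × String) x =>
          (s.1 + ([e, f, g, h].count x : Int), if 0 < [e, f, g, h].count x then x else s.2))
          ((0 : Int), "") [a, b, c, d] := by
    simp only [List.foldl_cons, List.foldl_nil]
    simp [pysem]
  rw [houter, pairFold [a, b, c, d] (fun x => ([e, f, g, h].count x : Int))
        (fun x => 0 < [e, f, g, h].count x) 0 "",
      lastIfFold [a, b, c, d] (fun x => 0 < [e, f, g, h].count x) ""]
  -- B reads the four cards of each row
  have hs1 : List.map (fun i => PySem.List.pyGetD (a :: b :: c :: d :: t1) i "") [0, 1, 2, 3] = [a, b, c, d] := by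
    simp [pysem]
  have hs2 : List.map (fun j => PySem.List.pyGetD (e :: f :: g :: h :: t2) j "") [0, 1, 2, 3] = [e, f, g, h] := by
    simp [pysem]
  rw [hs1, hs2, groupedSum [a, b, c, d] [e, f, g, h]]
  -- the filters with the Prop and the Bool tests agree
  have hfeq : ([a, b, c, d].filter (fun x => decide (0 < [e, f, g, h].count x)))
      = ([a, b, c, d].filter (fun x => [e, f, g, h].contains x)) := by
    apply List.filter_congr
    intro x _
    by_cases hx : x ∈ [e, f, g, h]
    · have hc1 := List.count_pos_iff.mpr hx
      have hc2 := List.contains_iff_mem.mpr hx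
      simp only [hc2, decide_eq_true_eq]
      exact hc1
    · have hc1 := List.count_eq_zero.mpr hx
      have hc2 : ¬ [e, f, g, h].contains x = true := fun hc => hx (List.contains_iff_mem.mp hc)
      rw [hc1, Bool.eq_false_iff.mpr hc2]
      rfl
  -- the Nat match count and the cast sum; case on its value
  set N := ([a, b, c, d].map (fun x => [e, f, g, h].count x)).sum with hN
  have hcast0 : ((0 : Int) + (([a, b, c, d].map (fun x => ([e, f, g, h].count x : Int))).sum)) = (N : Int) := by
    rw [hN, Nat.cast_list_sum, List.map_map]; ring_nf; rfl
  rw [hcast0]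
  rcases Nat.lt_or_ge N 2 with hlt | hge
  · interval_cases N
    · -- N = 0: both return 'Volunteer cheated!'
      simp
    · -- N = 1: A returns its card, B returns shared[0]; both are the unique shared card
      have hle := filterLen_le_sum [a, b, c, d] [e, f, g, h]
      rw [← hN] at hle
      have hne : [a, b, c, d].filter (fun x => [e, f, g, h].contains x) ≠ [] := by
        intro hnil
        have := sum_zero_of_filter_nil [a, b, c, d] [e, f, g, h] hnil
        rw [← hN] at this; omega
      have hlen1 : ([a, b, c, d].filter (fun x => [e, f, g, h].contains x)).length = 1 := by
        have : 0 < ([a, b, c, d].filter (fun x => [e, f, g, h].contains x)).length :=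
          List.length_pos_iff.mpr hne
        omega
      obtain ⟨x0, hx0⟩ := List.length_eq_one_iff.mp hlen1
      have hshared : (PySem.List.dedup [a, b, c, d]).filter (fun x => [e, f, g, h].contains x) = [x0] := by
        apply nodup_mem_singleton _ _ ((PySem.List.nodup_dedup _).filter _)
        intro y
        constructor
        · intro hy
          have hy' := List.mem_filter.mp hy
          have : y ∈ [a, b, c, d].filter (fun x => [e, f, g, h].contains x) :=
            List.mem_filter.mpr ⟨(PySem.List.mem_dedup _ _).mp hy'.1, hy'.2⟩
          rw [hx0] at this; simpa using this
        · intro hy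
          subst hy
          have : y ∈ [a, b, c, d].filter (fun x => [e, f, g, h].contains x) := by
            rw [hx0]; simp
          have hy' := List.mem_filter.mp this
          exact List.mem_filter.mpr ⟨(PySem.List.mem_dedup _ _).mpr hy'.1, hy'.2⟩
      rw [hfeq, hx0, hshared]
      simp [PySem.List.pyGetD_zero_cons]
  · -- N ≥ 2: both return 'Bad magician!'
    have h0 : ¬((N : Int) == 0) = true := by simp; omega
    have h1 : ¬((N : Int) == 1) = true := by simp; omega
    have h2' : (2 : Int) ≤ (N : Int) := by exact_mod_cast hge
    simp only [h0, h1, Bool.false_eq_true, if_false, if_pos h2']
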